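-- pv_equiv track=rewrite | github.com/g114064015lab/Lecture_13 | app.py | determine_dataset_type
-- ===== SOURCE A (Python) =====
-- from typing import Any, Dict, List, Optional
--
-- def determine_dataset_type(locations: List[Dict[str, Any]]) -> str:
--     if not locations:
--         return "unknown"
--     if all(location.get("category") == "tide" for location in locations):
--         return "tide"
--     if all(location.get("category") == "weather" for location in locations):
--         return "weather"
--     return "mixed"
-- ===== SOURCE B (Python) =====
-- def determine_dataset_type(locations):
--     cats = {loc.get("category") for loc in locations}
--     if not cats:
--         return "unknown"
--     if cats == {"tide"}:
--         return "tide"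
--     if cats == {"weather"}:
--         return "weather"
--     return "mixed"
-- ===== Notes on version B (the rewrite author's own statement) =====
-- stated objective: simpler
-- what changed: Replaces the empty-check plus two all()-rescans with a single set comprehension collecting the distinct category values, then decides by comparing that set to {'tide'} / {'weather'}.
import Mathlib
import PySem

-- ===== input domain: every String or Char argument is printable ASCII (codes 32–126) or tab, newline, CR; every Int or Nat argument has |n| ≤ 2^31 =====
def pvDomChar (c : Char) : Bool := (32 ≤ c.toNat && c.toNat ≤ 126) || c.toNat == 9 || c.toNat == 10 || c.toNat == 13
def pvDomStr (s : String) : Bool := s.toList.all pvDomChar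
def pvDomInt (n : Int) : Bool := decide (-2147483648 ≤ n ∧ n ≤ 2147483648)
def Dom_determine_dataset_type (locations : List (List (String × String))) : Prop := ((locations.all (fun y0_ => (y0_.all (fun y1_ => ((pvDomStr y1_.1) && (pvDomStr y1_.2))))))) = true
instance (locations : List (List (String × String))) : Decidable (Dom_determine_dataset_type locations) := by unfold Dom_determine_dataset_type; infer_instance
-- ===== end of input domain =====

-- B replaces the empty-check plus two all()-rescans with one set of the distinct
-- category values, compared against {"tide"} / {"weather"} (objective: simpler).

-- ===== PORT A =====
def determine_dataset_type (locations : List (List (String × String))) : String :=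
  if locations = [] then "unknown"
  else if locations.all (fun location => (PySem.Dict.mk location).get? "category" = some "tide") then "tide"
  else if locations.all (fun location => (PySem.Dict.mk location).get? "category" = some "weather") then "weather"
  else "mixed"

-- ===== PORT B =====
def determine_dataset_type_alt (locations : List (List (String × String))) : String :=
  let cats : PySem.Set (Option String) :=
    PySem.Set.ofList (locations.map (fun loc => (PySem.Dict.mk loc).get? "category"))
  if cats = [] then "unknown"
  else if PySem.Set.equal cats (PySem.Set.ofList [some "tide"]) then "tide"
  else if PySem.Set.equal cats (PySem.Set.ofList [some "weather"]) then "weather"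
  else "mixed"

-- ===== PRECONDITION & SPEC =====
def Spec_determine_dataset_type (locations : List (List (String × String))) (out : String) : Prop := out = determine_dataset_type_alt locations
instance (locations : List (List (String × String))) (out : String) : Decidable (Spec_determine_dataset_type locations out) := by unfold Spec_determine_dataset_type; infer_instance

-- ===== CLAIM (what is proved, stated in full; the proofs are below) =====
def Claim_equal_determine_dataset_type : Prop := ∀ (locations : List (List (String × String))), Dom_determine_dataset_type locations → Spec_determine_dataset_type locations (determine_dataset_type locations)

-- ===== LEMMAS AND PROOFS =====

-- set(map f xs) is empty iff xs is empty
theorem pv_ofList_map_eq_nil {α β : Type} [BEq β] [LawfulBEq β] (xs : List α) (f : α → β) :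
    (PySem.Set.ofList (xs.map f) = [] ↔ xs = []) := by
  constructor
  · intro h
    cases xs with
    | nil => rfl
    | cons a t =>
      exfalso
      have : f a ∈ PySem.Set.ofList ((a :: t).map f) := by
        rw [PySem.Set.mem_ofList]; simp
      rw [h] at this; exact (List.not_mem_nil) this
  · intro h; subst h; rfl

-- set(map f xs) == {c} iff xs nonempty and every f x = c
theorem pv_ofList_map_equal_singleton {α β : Type} [BEq β] [LawfulBEq β]
    (xs : List α) (f : α → β) (c : β) :
    (PySem.Set.equal (PySem.Set.ofList (xs.map f)) (PySem.Set.ofList [c]) = true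
      ↔ xs ≠ [] ∧ ∀ x ∈ xs, f x = c) := by
  rw [PySem.Set.equal_iff]
  constructor
  · intro h
    constructor
    · intro hnil; subst hnil
      have := (h c).2 (by rw [PySem.Set.mem_ofList]; simp)
      rw [PySem.Set.mem_ofList] at this; simp at this
    · intro x hx
      have := (h (f x)).1 (by rw [PySem.Set.mem_ofList]; exact List.mem_map_of_mem hx)
      rw [PySem.Set.mem_ofList] at this; simpa using this
  · rintro ⟨hne, hall⟩ y
    rw [PySem.Set.mem_ofList, PySem.Set.mem_ofList]
    constructor
    · intro hy
      rcases List.mem_map.mp hy with ⟨x, hx, rfl⟩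
      simp [hall x hx]
    · intro hy
      simp at hy; subst hy
      rcases List.exists_mem_of_ne_nil xs hne with ⟨x, hx⟩
      exact List.mem_map.mpr ⟨x, hx, hall x hx⟩

-- ===== VERDICT (by name: the statement is the Claim_ definition above) =====
theorem determine_dataset_type_spec : Claim_equal_determine_dataset_type := by
  intro locations _
  unfold Spec_determine_dataset_type determine_dataset_type determine_dataset_type_alt
  by_cases hnil : locations = []
  · subst hnil; rfl
  · simp only [hnil, if_false]
    rw [if_neg (fun h => hnil ((pv_ofList_map_eq_nil _ _).1 h))]
    have e : ∀ c : String,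
        ((PySem.Set.ofList (List.map (fun loc => (PySem.Dict.mk loc).get? "category") locations)).equal
          (PySem.Set.ofList [some c]) = true)
        = ((locations.all fun location => (PySem.Dict.mk location).get? "category" = some c) = true) := by
      intro c
      apply propext
      rw [pv_ofList_map_equal_singleton, List.all_eq_true]
      constructor
      · rintro ⟨_, h⟩ x hx; simpa using h x hx
      · intro h; exact ⟨hnil, fun x hx => by simpa using h x hx⟩
    simp only [e]
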